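-- pv_equiv track=rewrite | github.com/sethantanah/landsearch | src/utils/data_loader.py | extract_plot_metadata
-- ===== SOURCE A (Python) =====
-- from typing import Dict, List, Optional
--
-- def extract_plot_metadata(plots: List[Dict]) -> Dict:
--     """
--     Extract metadata from plots for filtering and display
--
--     Args:
--         plots: List of plot dictionaries
--
--     Returns:
--         Dictionary of extracted metadata
--     """
--     metadata = {
--         "regions": set(),
--         "districts": set(),
--         "localities": set(),
--         "plot_numbers": set(),
--     }
--
--     for plot in plots:
--         plot_info = plot.get("plot_info", {})
--
--         # Safely extract and add metadata
--         metadata["regions"].add(plot_info.get("region", "Unknown"))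
--         metadata["districts"].add(plot_info.get("district", "Unknown"))
--         metadata["localities"].add(plot_info.get("locality", "Unknown"))
--         metadata["plot_numbers"].add(plot_info.get("plot_number", "Unknown"))
--
--     # Filter out None values and sort
--     return {k: sorted(filter(None, v)) for k, v in metadata.items()}
-- ===== SOURCE B (Python) =====
-- from typing import Dict, List, Optional
--
-- def _field(plots, key):
--     # sort (with duplicates), then one linear scan dropping falsy values and
--     # adjacent duplicates -- no set is ever built
--     vals = sorted(plot.get("plot_info", {}).get(key, "Unknown") for plot in plots)
--     out = []
--     for v in vals:
--         if v and (not out or out[-1] != v):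
--             out.append(v)
--     return out
--
-- def extract_plot_metadata(plots: List[Dict]) -> Dict:
--     """Sort-then-scan: per field, sort all values and deduplicate adjacent runs."""
--     return {
--         "regions": _field(plots, "region"),
--         "districts": _field(plots, "district"),
--         "localities": _field(plots, "locality"),
--         "plot_numbers": _field(plots, "plot_number"),
--     }
-- ===== Notes on version B (the rewrite author's own statement) =====
-- stated objective: alternative
-- what changed: Replaces A's hash-set accumulation (one pass filling four sets, then sorted(filter(None, set))) with a sort-then-scan algorithm: per field, sort the full multiset of values and remove falsy values and adjacent duplicates in one linear scan, using no set at all.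
import Mathlib
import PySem

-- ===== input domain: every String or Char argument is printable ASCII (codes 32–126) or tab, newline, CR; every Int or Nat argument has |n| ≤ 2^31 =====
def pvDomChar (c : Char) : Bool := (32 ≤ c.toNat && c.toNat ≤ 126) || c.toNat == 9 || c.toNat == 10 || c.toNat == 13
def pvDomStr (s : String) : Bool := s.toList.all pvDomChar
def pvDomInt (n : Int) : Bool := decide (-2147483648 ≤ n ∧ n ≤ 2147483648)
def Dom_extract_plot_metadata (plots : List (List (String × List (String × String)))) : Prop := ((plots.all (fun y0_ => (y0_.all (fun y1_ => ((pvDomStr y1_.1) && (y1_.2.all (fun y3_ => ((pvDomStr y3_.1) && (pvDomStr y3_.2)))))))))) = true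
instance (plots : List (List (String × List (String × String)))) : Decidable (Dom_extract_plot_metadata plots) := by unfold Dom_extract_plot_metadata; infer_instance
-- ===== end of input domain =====

-- B replaces A's hash-set accumulation with a sort-then-scan algorithm: per field it
-- sorts all values (duplicates included) and removes falsy values and adjacent
-- duplicates in one linear scan — no set is built (alternative, same order of cost).

-- ===== PORT A =====
-- plot.get("plot_info", {})   (first-match lookup, like Python's dict)
def pvInfoA (plot : List (String × List (String × String))) : List (String × String) :=
  (PySem.Dict.mk plot).getD "plot_info" []

-- plot_info.get(col, "Unknown")
def pvGetA (info : List (String × String)) (col : String) : String :=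
  (PySem.Dict.mk info).getD col "Unknown"

def extract_plot_metadata (plots : List (List (String × List (String × String)))) : List (String × List String) :=
  -- the metadata dict of four sets, threaded through one loop over plots
  let m : PySem.Set String × PySem.Set String × PySem.Set String × PySem.Set String :=
    plots.foldl
      (fun m plot =>
        let info := pvInfoA plot
        (PySem.Set.add m.1 (pvGetA info "region"),
         PySem.Set.add m.2.1 (pvGetA info "district"),
         PySem.Set.add m.2.2.1 (pvGetA info "locality"),
         PySem.Set.add m.2.2.2 (pvGetA info "plot_number")))
      (PySem.Set.empty, PySem.Set.empty, PySem.Set.empty, PySem.Set.empty)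
  -- {k: sorted(filter(None, v)) for k, v in metadata.items()}
  [("regions",      PySem.List.sorted (m.1.filter (fun s => s ≠ "")) (fun x => x) false),
   ("districts",    PySem.List.sorted (m.2.1.filter (fun s => s ≠ "")) (fun x => x) false),
   ("localities",   PySem.List.sorted (m.2.2.1.filter (fun s => s ≠ "")) (fun x => x) false),
   ("plot_numbers", PySem.List.sorted (m.2.2.2.filter (fun s => s ≠ "")) (fun x => x) false)]

-- ===== PORT B =====
-- plot.get("plot_info", {}).get(col, "Unknown")
def pvFieldB (plot : List (String × List (String × String))) (col : String) : String :=
  (PySem.Dict.mk ((PySem.Dict.mk plot).getD "plot_info" [])).getD col "Unknown"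

-- the dedup scan: for v in vals: if v and (not out or out[-1] != v): out.append(v)
def pvScanB (vals : List String) : List String :=
  vals.foldl
    (fun out v => if v ≠ "" ∧ (out = [] ∨ out.getLast? ≠ some v) then out ++ [v] else out)
    []

-- _field(plots, key): sort all values, then the linear dedup scan
def pvFieldOf (plots : List (List (String × List (String × String)))) (key : String) : List String :=
  pvScanB (PySem.List.sorted (plots.map (fun plot => pvFieldB plot key)) (fun x => x) false)

def extract_plot_metadata_alt (plots : List (List (String × List (String × String)))) : List (String × List String) :=
  [("regions",      pvFieldOf plots "region"),
   ("districts",    pvFieldOf plots "district"),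
   ("localities",   pvFieldOf plots "locality"),
   ("plot_numbers", pvFieldOf plots "plot_number")]

-- ===== PRECONDITION & SPEC =====
def Spec_extract_plot_metadata (plots : List (List (String × List (String × String)))) (out : List (String × List String)) : Prop := out = extract_plot_metadata_alt plots
instance (plots : List (List (String × List (String × String)))) (out : List (String × List String)) : Decidable (Spec_extract_plot_metadata plots out) := by unfold Spec_extract_plot_metadata; infer_instance

-- ===== CLAIM (what is proved, stated in full; the proofs are below) =====
def Claim_equal_extract_plot_metadata : Prop := ∀ (plots : List (List (String × List (String × String)))), Dom_extract_plot_metadata plots → Spec_extract_plot_metadata plots (extract_plot_metadata plots)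

-- ===== LEMMAS AND PROOFS =====

-- A's single fold over a 4-tuple of sets decomposes into four independent folds.
theorem pv_foldl_quad {α : Type} (g1 g2 g3 g4 : α → String) (xs : List α) :
    ∀ (a b c d : PySem.Set String),
      xs.foldl
        (fun m p =>
          (PySem.Set.add m.1 (g1 p), PySem.Set.add m.2.1 (g2 p),
           PySem.Set.add m.2.2.1 (g3 p), PySem.Set.add m.2.2.2 (g4 p)))
        (a, b, c, d)
      = (xs.foldl (fun s p => PySem.Set.add s (g1 p)) a,
         xs.foldl (fun s p => PySem.Set.add s (g2 p)) b,
         xs.foldl (fun s p => PySem.Set.add s (g3 p)) c,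
         xs.foldl (fun s p => PySem.Set.add s (g4 p)) d) := by
  induction xs with
  | nil => intro a b c d; rfl
  | cons x t ih => intro a b c d; simpa [List.foldl] using ih _ _ _ _

-- folding add of a mapped value is set(comprehension)
theorem pv_foldl_add_map {α : Type} (g : α → String) (xs : List α) :
    xs.foldl (fun s p => PySem.Set.add s (g p)) PySem.Set.empty
      = PySem.Set.ofList (xs.map g) := by
  rw [PySem.Set.ofList_eq_foldl, List.foldl_map]
  rfl

-- getLast? = some x means x is a member
theorem pv_mem_of_getLast {l : List String} {x : String} (h : l.getLast? = some x) : x ∈ l := by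
  obtain ⟨hne, rfl⟩ := List.mem_getLast?_eq_getLast (l := l) (x := x) (by simp [h])
  exact List.getLast_mem hne

theorem pv_le_getLast : ∀ (l : List String) (x : String),
    l.Pairwise (· < ·) → l.getLast? = some x → ∀ a ∈ l, a ≤ x := by
  intro l
  induction l with
  | nil => simp
  | cons b t ih =>
    intro x hp hl a ha
    rcases List.pairwise_cons.1 hp with ⟨hb, ht⟩
    cases t with
    | nil =>
      simp only [List.getLast?_singleton, Option.some.injEq] at hl
      simp only [List.mem_singleton] at ha
      subst hl; subst ha; exact le_refl _
    | cons c u =>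
      rw [List.getLast?_cons_cons] at hl
      rcases List.mem_cons.1 ha with rfl | hat
      · exact le_of_lt (hb x (pv_mem_of_getLast hl))
      · exact ih x ht hl a hat

theorem pv_scan_spec : ∀ (vals : List String) (acc : List String),
    vals.Pairwise (· ≤ ·) → acc.Pairwise (· < ·) →
    (∀ a ∈ acc, ∀ v ∈ vals, a ≤ v) →
    (vals.foldl
      (fun out v => if v ≠ "" ∧ (out = [] ∨ out.getLast? ≠ some v) then out ++ [v] else out)
      acc).Pairwise (· < ·) ∧
    (∀ x, x ∈ vals.foldl
      (fun out v => if v ≠ "" ∧ (out = [] ∨ out.getLast? ≠ some v) then out ++ [v] else out)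
      acc ↔ x ∈ acc ∨ (x ∈ vals ∧ x ≠ "")) := by
  intro vals
  induction vals with
  | nil => intro acc _ hacc _; exact ⟨hacc, by simp⟩
  | cons v t ih =>
    intro acc hs hacc hle
    rcases List.pairwise_cons.1 hs with ⟨hv, ht⟩
    simp only [List.foldl_cons]
    by_cases hcond : v ≠ "" ∧ (acc = [] ∨ acc.getLast? ≠ some v)
    · rw [if_pos hcond]
      have hlt : ∀ a ∈ acc, a < v := by
        intro a ha
        have h1 : a ≤ v := hle a ha v (List.mem_cons_self)
        rcases lt_or_eq_of_le h1 with h | rfl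
        · exact h
        · exfalso
          rcases hcond.2 with hnil | hlast
          · simp [hnil] at ha
          · have hne : acc ≠ [] := by rintro rfl; simp at ha
            obtain ⟨x, hx⟩ := Option.isSome_iff_exists.1 (List.getLast?_isSome.2 hne)
            have h2 : a ≤ x := pv_le_getLast acc x hacc hx a ha
            have h3 : x ≤ a := hle x (pv_mem_of_getLast hx) a (List.mem_cons_self)
            exact hlast (by rw [hx, le_antisymm h3 h2])
      have hacc' : (acc ++ [v]).Pairwise (· < ·) := by
        rw [List.pairwise_append]
        exact ⟨hacc, List.pairwise_singleton _ _, fun a ha y hy => by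
          simp only [List.mem_singleton] at hy; subst hy; exact hlt a ha⟩
      have hle' : ∀ a ∈ acc ++ [v], ∀ y ∈ t, a ≤ y := by
        intro a ha y hy
        rcases List.mem_append.1 ha with h | h
        · exact hle a h y (List.mem_cons_of_mem _ hy)
        · simp only [List.mem_singleton] at h; subst h; exact hv y hy
      obtain ⟨P, M⟩ := ih (acc ++ [v]) ht hacc' hle'
      refine ⟨P, fun x => ?_⟩
      rw [M x]
      simp only [List.mem_append, List.mem_cons, List.not_mem_nil, or_false]
      constructor
      · rintro ((h | rfl) | ⟨h, hne⟩)
        · exact Or.inl h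
        · exact Or.inr ⟨Or.inl rfl, hcond.1⟩
        · exact Or.inr ⟨Or.inr h, hne⟩
      · rintro (h | ⟨(rfl | h), hne⟩)
        · exact Or.inl (Or.inl h)
        · exact Or.inl (Or.inr rfl)
        · exact Or.inr ⟨h, hne⟩
    · rw [if_neg hcond]
      push Not at hcond
      have hle' : ∀ a ∈ acc, ∀ y ∈ t, a ≤ y :=
        fun a ha y hy => hle a ha y (List.mem_cons_of_mem _ hy)
      obtain ⟨P, M⟩ := ih acc ht hacc hle'
      refine ⟨P, fun x => ?_⟩
      rw [M x]
      simp only [List.mem_cons]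
      constructor
      · rintro (h | ⟨h, hne⟩)
        · exact Or.inl h
        · exact Or.inr ⟨Or.inr h, hne⟩
      · rintro (h | ⟨(rfl | h), hne⟩)
        · exact Or.inl h
        · -- v is not appended: either v = "" (contradiction with hne) or last = v, so v ∈ acc
          by_cases hvv : x = ""
          · exact absurd hvv hne
          · rcases hcond hvv with ⟨hne2, hlast⟩
            exact Or.inl (pv_mem_of_getLast hlast)
        · exact Or.inr ⟨h, hne⟩

theorem pv_field_eq (L : List String) :
    PySem.List.sorted ((PySem.Set.ofList L).filter (fun s => s ≠ "")) (fun x => x) false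
      = pvScanB (PySem.List.sorted L (fun x => x) false) := by
  have hs : (PySem.List.sorted L (fun x => x) false).Pairwise (· ≤ ·) :=
    PySem.List.sorted_pairwise L (fun x => x) 
  obtain ⟨P, M⟩ := pv_scan_spec (PySem.List.sorted L (fun x => x) false) [] hs
    (List.Pairwise.nil) (by simp)
  have hmem : ∀ x, x ∈ pvScanB (PySem.List.sorted L (fun x => x) false) ↔ x ∈ L ∧ x ≠ "" := by
    intro x
    rw [pvScanB, M x]
    simp [PySem.List.mem_sorted]
  apply PySem.List.sorted_eq_of_perm_of_pairwise_lt
  · -- perm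
    apply (List.perm_ext_iff_of_nodup ?_ ?_).2
    · intro x
      rw [hmem x]
      simp [List.mem_filter, PySem.Set.mem_ofList]
    · exact P.imp (fun h => ne_of_lt h)
    · exact (PySem.Set.nodup_ofList L).filter _
  · exact P

-- ===== VERDICT (by name: the statement is the Claim_ definition above) =====
theorem extract_plot_metadata_spec : Claim_equal_extract_plot_metadata := by
  intro plots _
  unfold Spec_extract_plot_metadata extract_plot_metadata extract_plot_metadata_alt
  rw [pv_foldl_quad (fun p => pvGetA (pvInfoA p) "region")
        (fun p => pvGetA (pvInfoA p) "district")
        (fun p => pvGetA (pvInfoA p) "locality")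
        (fun p => pvGetA (pvInfoA p) "plot_number") plots]
  simp only [pv_foldl_add_map, pv_field_eq]
  rfl
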